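-- pv_equiv track=rewrite | github.com/nhungla/Data-Structures-and-Algorithms | Dynamic Array and String/Suffix Structures - Codeforces.py | solution
-- ===== SOURCE A (Python) =====
-- import collections
--
-- def solution(s, t):
--     s_counter, t_counter = collections.Counter(s), collections.Counter(t)
--     array, auto = False, False
--     if len(s_counter) < len(t_counter):
--         return 0
--     for val in t_counter:
--         if s_counter[val] < t_counter[val]:
--             return 0
--         if s_counter[val] > t_counter[val]:
--             auto = True
--     if len(s_counter) > len(t_counter):
--         auto = True
--     idx, order = 0, -1
--     for i, val in enumerate(t):
--         idx = s.find(val, order + 1)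
--         if idx > order:
--             order = idx
--         else:
--             array = True
--             break
--
--     if auto and array:
--         return 3
--     if auto:
--         return 1
--     if array:
--         return 2
-- ===== SOURCE B (Python) =====
-- def solution(s, t):
--     # multiset check via sorted merge scan instead of Counter
--     sa, sb = sorted(s), sorted(t)
--     i = 0
--     for c in sb:
--         while i < len(sa) and sa[i] < c:
--             i += 1
--         if i == len(sa) or sa[i] != c:
--             return 0
--         i += 1
--     auto = sa != sb
--     # subsequence check via single two-pointer scan over s (no find calls)
--     k = 0
--     for ch in s:
--         if k < len(t) and ch == t[k]:
--             k += 1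
--     array = k < len(t)
--     if auto and array:
--         return 3
--     if auto:
--         return 1
--     if array:
--         return 2
-- ===== Notes on version B (the rewrite author's own statement) =====
-- stated objective: alternative
-- what changed: Replaces the Counter hash-multiset comparison and its key-iteration loop by sorting both strings and running one merge-style two-pointer scan (inclusion = merge succeeds, auto = sorted lists differ), and replaces the repeated s.find greedy subsequence loop by a single two-pointer scan over s.
import Mathlib
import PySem

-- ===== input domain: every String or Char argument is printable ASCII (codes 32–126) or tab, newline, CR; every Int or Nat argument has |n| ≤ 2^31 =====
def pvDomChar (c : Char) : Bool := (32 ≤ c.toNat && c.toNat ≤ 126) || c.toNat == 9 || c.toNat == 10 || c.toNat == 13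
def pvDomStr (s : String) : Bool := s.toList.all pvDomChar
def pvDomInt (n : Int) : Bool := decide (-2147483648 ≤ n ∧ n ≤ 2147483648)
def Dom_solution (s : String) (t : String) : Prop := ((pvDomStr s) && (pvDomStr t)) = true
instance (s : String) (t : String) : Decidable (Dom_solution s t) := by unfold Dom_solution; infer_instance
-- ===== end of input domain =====

-- B replaces A's Counter hash-multiset comparison by a sort + merge two-pointer scan and the
-- repeated s.find greedy loop by one two-pointer subsequence scan; objective: alternative (not faster).

-- ===== PORT A =====
-- the 'for val in t_counter' loop: returns none on 'return 0', otherwise some of the final 'auto'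
def solLoop1 (sc tc : PySem.Dict Char Int) : List Char → Bool → Option Bool
  | [], auto => some auto
  | v :: rest, auto =>
    if sc.getD v 0 < tc.getD v 0 then none
    else if sc.getD v 0 > tc.getD v 0 then solLoop1 sc tc rest true
    else solLoop1 sc tc rest auto

-- the 'for i, val in enumerate(t)' loop: returns the final 'array'
def solLoop2 (s : List Char) : List Char → Int → Bool
  | [], _ => false
  | v :: rest, order =>
    let idx := PySem.Chars.findFrom s [v] (order + 1) none
    if idx > order then solLoop2 s rest idx else true

def solution (s : String) (t : String) : Option Int :=
  let sc := PySem.Dict.counter s.toList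
  let tc := PySem.Dict.counter t.toList
  if sc.keys.length < tc.keys.length then some 0
  else
    match solLoop1 sc tc tc.keys false with
    | none => some 0
    | some auto0 =>
      let auto := auto0 || decide (sc.keys.length > tc.keys.length)
      let array := solLoop2 s.toList t.toList (-1)
      if auto && array then some 3
      else if auto then some 1
      else if array then some 2
      else none

-- ===== PORT B =====
-- merge-style scan over the two sorted lists: true iff every char of the second is matched
def mergeScan : List Char → List Char → Bool
  | _, [] => true
  | [], _ :: _ => false
  | a :: sa, b :: sb =>
    if a < b then mergeScan sa (b :: sb)
    else if a = b then mergeScan sa sb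
    else false

-- two-pointer subsequence scan: the part of the second list left unmatched after one pass over the first
def scanSub : List Char → List Char → List Char
  | [], rem => rem
  | _ :: cs, [] => scanSub cs []
  | c :: cs, r :: rs => if c = r then scanSub cs rs else scanSub cs (r :: rs)

def solution_alt (s : String) (t : String) : Option Int :=
  let sa := PySem.List.sorted s.toList (fun c => c) false
  let sb := PySem.List.sorted t.toList (fun c => c) false
  if mergeScan sa sb = false then some 0
  else
    let auto := decide (sa ≠ sb)
    let array := decide (scanSub s.toList t.toList ≠ [])
    if auto && array then some 3
    else if auto then some 1
    else if array then some 2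
    else none

-- ===== PRECONDITION & SPEC =====
def Spec_solution (s : String) (t : String) (out : Option Int) : Prop := out = solution_alt s t
instance (s : String) (t : String) (out : Option Int) : Decidable (Spec_solution s t out) := by unfold Spec_solution; infer_instance

-- ===== CLAIM (what is proved, stated in full; the proofs are below) =====
def Claim_equal_solution : Prop := ∀ (s : String) (t : String), Dom_solution s t → Spec_solution s t (solution s t)

-- ===== LEMMAS AND PROOFS =====

theorem loop1_spec (l m : List Char) : ∀ (ks : List Char) (auto : Bool),
    solLoop1 (PySem.Dict.counter l) (PySem.Dict.counter m) ks auto =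
      if ∀ v ∈ ks, m.count v ≤ l.count v then
        some (auto || ks.any (fun v => decide (l.count v > m.count v)))
      else none := by
  intro ks
  induction ks with
  | nil => intro auto; simp [solLoop1]
  | cons v ks ih =>
    intro auto
    simp only [solLoop1, PySem.Dict.getD_counter]
    rcases lt_trichotomy (l.count v) (m.count v) with h | h | h
    · have h1 : ((l.count v : Int) < (m.count v : Int)) := by exact_mod_cast h
      rw [if_pos h1, if_neg (show ¬ ∀ w ∈ v :: ks, m.count w ≤ l.count w by
        intro hc; exact absurd (hc v (List.mem_cons_self)) (by omega))]
    · have h1 : ¬ ((l.count v : Int) < (m.count v : Int)) := by omega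
      have h2 : ¬ ((l.count v : Int) > (m.count v : Int)) := by omega
      rw [if_neg h1, if_neg h2, ih]
      by_cases hall : ∀ w ∈ ks, m.count w ≤ l.count w
      · rw [if_pos hall, if_pos (show ∀ w ∈ v :: ks, m.count w ≤ l.count w by
          intro w hw
          rcases List.mem_cons.mp hw with rfl | hw
          · omega
          · exact hall w hw)]
        simp [List.any_cons, h]
      · rw [if_neg hall, if_neg (show ¬ ∀ w ∈ v :: ks, m.count w ≤ l.count w by
          intro hc; exact hall fun w hw => hc w (List.mem_cons_of_mem _ hw))]
    · have h1 : ¬ ((l.count v : Int) < (m.count v : Int)) := by omega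
      have h2 : ((l.count v : Int) > (m.count v : Int)) := by exact_mod_cast h
      rw [if_neg h1, if_pos h2, ih]
      by_cases hall : ∀ w ∈ ks, m.count w ≤ l.count w
      · rw [if_pos hall, if_pos (show ∀ w ∈ v :: ks, m.count w ≤ l.count w by
          intro w hw
          rcases List.mem_cons.mp hw with rfl | hw
          · omega
          · exact hall w hw)]
        simp [List.any_cons, h]
      · rw [if_neg hall, if_neg (show ¬ ∀ w ∈ v :: ks, m.count w ≤ l.count w by
          intro hc; exact hall fun w hw => hc w (List.mem_cons_of_mem _ hw))]

theorem mergeScan_true_iff : ∀ (sa sb : List Char),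
    sa.Pairwise (· ≤ ·) → sb.Pairwise (· ≤ ·) →
    (mergeScan sa sb = true ↔ sb.Subperm sa) := by
  intro sa
  induction sa with
  | nil =>
    intro sb _ _
    cases sb with
    | nil => simp [mergeScan]
    | cons b bs =>
      simp only [mergeScan, Bool.false_eq_true, false_iff]
      intro hc
      simpa using hc.length_le
  | cons a as ih =>
    intro sb ha hb
    cases sb with
    | nil => simp [mergeScan, List.nil_subperm]
    | cons b bs =>
      have ha' := (List.pairwise_cons.mp ha).2
      have haf := (List.pairwise_cons.mp ha).1
      have hb' := (List.pairwise_cons.mp hb).2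
      have hbf := (List.pairwise_cons.mp hb).1
      simp only [mergeScan]
      by_cases h1 : a < b
      · rw [if_pos h1, ih (b :: bs) ha' hb]
        constructor
        · intro hsp
          exact hsp.trans (List.sublist_cons_self a as).subperm
        · intro hsp
          rw [List.subperm_iff_count] at hsp ⊢
          intro x
          have hx := hsp x
          rcases eq_or_ne x a with rfl | hne
          · have hz : List.count x (b :: bs) = 0 := by
              rw [List.count_eq_zero]
              intro hmem
              rcases List.mem_cons.mp hmem with rfl | hmem
              · exact absurd h1 (lt_irrefl _)
              · exact absurd (hbf _ hmem) (not_le.mpr h1)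
            rw [hz]; exact Nat.zero_le _
          · rwa [List.count_cons_of_ne (Ne.symm hne)] at hx
      · rw [if_neg h1]
        by_cases h2 : a = b
        · subst h2
          rw [if_pos rfl, ih bs ha' hb', List.subperm_cons]
        · rw [if_neg h2]
          simp only [Bool.false_eq_true, false_iff]
          intro hsp
          have hba : b < a := lt_of_le_of_ne (not_lt.mp h1) (fun hc => h2 hc.symm)
          have hmem : b ∈ a :: as := hsp.subset List.mem_cons_self
          rcases List.mem_cons.mp hmem with rfl | hmem
          · exact h2 rfl
          · exact absurd (haf _ hmem) (not_le.mpr hba)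

theorem scanSub_eq_nil_iff : ∀ (l m : List Char), (scanSub l m = [] ↔ m.Sublist l) := by
  intro l
  induction l with
  | nil =>
    intro m
    cases m <;> simp [scanSub]
  | cons c cs ih =>
    intro m
    cases m with
    | nil => simp [scanSub, (ih []).mpr (List.nil_sublist _)]
    | cons r rs =>
      simp only [scanSub]
      by_cases h : c = r
      · subst h
        rw [if_pos rfl, ih rs, List.cons_sublist_cons]
      · rw [if_neg h, ih (r :: rs)]
        constructor
        · exact fun hs => List.sublist_cons_of_sublist _ hs
        · intro hs
          cases hs with
          | cons _ hs => exact hs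
          | cons₂ _ hs => exact absurd rfl h

theorem singleton_prefix_iff (v : Char) (zs : List Char) : [v] <+: zs ↔ ∃ ws, zs = v :: ws := by
  cases zs with
  | nil => simp
  | cons z ws =>
    constructor
    · intro h
      rcases List.cons_prefix_cons.mp h with ⟨rfl, -⟩
      exact ⟨ws, rfl⟩
    · rintro ⟨ws', hws⟩
      cases hws
      exact ⟨ws, rfl⟩

theorem mem_iff_singleton_infix (v : Char) (d : List Char) : v ∈ d ↔ [v] <:+: d := by
  constructor
  · intro h
    obtain ⟨p, q, rfl⟩ := List.append_of_mem h
    exact ⟨p, q, by simp⟩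
  · intro h
    exact List.singleton_sublist.mp h.sublist

theorem loop2_spec (l : List Char) : ∀ (rest : List Char) (k : Nat), k ≤ l.length →
    (solLoop2 l rest ((k : Int) - 1) = false ↔ rest.Sublist (l.drop k)) := by
  intro rest
  induction rest with
  | nil => intro k hk; simp [solLoop2]
  | cons v rest ih =>
    intro k hk
    simp only [solLoop2]
    have harg : (k : Int) - 1 + 1 = (k : Int) := by ring
    rw [harg, PySem.Chars.findFrom_natCast l [v] k hk]
    by_cases hf : PySem.Chars.find (l.drop k) [v] = -1
    · rw [if_pos hf, if_neg (by omega : ¬((-1 : Int) > (k : Int) - 1))]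
      have hnm : v ∉ l.drop k := by
        rw [mem_iff_singleton_infix]
        exact (PySem.Chars.find_eq_neg_one_iff _ _).mp hf
      simp only [Bool.true_eq_false, false_iff]
      intro hs
      exact hnm (hs.subset List.mem_cons_self)
    · rw [if_neg hf]
      have hf0 : 0 ≤ PySem.Chars.find (l.drop k) [v] := by
        have := PySem.Chars.neg_one_le_find (l.drop k) [v]
        omega
      obtain ⟨hpre, hmin⟩ := PySem.Chars.find_spec (s := l.drop k) (sub := [v]) hf0
      set n := (PySem.Chars.find (l.drop k) [v]).toNat with hn
      have hfn : PySem.Chars.find (l.drop k) [v] = (n : Int) := by omega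
      rw [if_pos (by omega : (k : Int) + PySem.Chars.find (l.drop k) [v] > (k : Int) - 1)]
      rw [List.drop_drop] at hpre
      obtain ⟨ws, hws⟩ := (singleton_prefix_iff v _).mp hpre
      have hws' : ws = l.drop (k + n + 1) := by
        have h1 : (l.drop (k + n)).drop 1 = l.drop (k + n + 1) := by
          rw [List.drop_drop]
        rw [hws] at h1
        simp only [List.drop_one, List.tail_cons] at h1
        exact h1
      have hk1 : k + n + 1 ≤ l.length := by
        have : l.drop (k + n) ≠ [] := by rw [hws]; simp
        have hlen := List.drop_eq_nil_iff.not.mp this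
        omega
      have hrw : (k : Int) + PySem.Chars.find (l.drop k) [v] = ((k + n + 1 : Nat) : Int) - 1 := by
        push_cast
        omega
      rw [hrw, ih (k + n + 1) hk1]
      have hdk : l.drop (k + n) = v :: l.drop (k + n + 1) := by rw [hws, hws']
      constructor
      · -- rest <+ drop (k+n+1) → v :: rest <+ drop k
        intro hs
        have h1 : (v :: rest).Sublist (l.drop (k + n)) := by
          rw [hdk]
          exact List.cons_sublist_cons.mpr hs
        have h2 : (l.drop (k + n)).Sublist (l.drop k) := by
          rw [← List.drop_drop]
          exact (List.drop_suffix _ _).sublist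
        exact h1.trans h2
      · -- v :: rest <+ drop k → rest <+ drop (k+n+1)
        intro hs
        rcases List.cons_sublist_iff.mp hs with ⟨r₁, r₂, heq, hv, hrest⟩
        obtain ⟨p, q, hr1⟩ := List.append_of_mem hv
        have hd1 : (l.drop k).drop p.length = v :: (q ++ r₂) := by
          rw [heq, hr1, List.append_assoc, List.cons_append, List.drop_left]
        have hnp : n ≤ p.length := by
          by_contra hc
          exact hmin p.length (by omega) (by rw [hd1]; exact ⟨q ++ r₂, rfl⟩)
        have hlen1 : n + 1 ≤ r₁.length := by
          rw [hr1]
          simp only [List.length_append, List.length_cons]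
          omega
        have hd2 : (l.drop k).drop (n + 1) = r₁.drop (n + 1) ++ r₂ := by
          rw [heq, List.drop_append_of_le_length hlen1]
        have h2 : r₂.Sublist (l.drop (k + n + 1)) := by
          have : (l.drop k).drop (n + 1) = l.drop (k + n + 1) := by
            rw [List.drop_drop, Nat.add_assoc]
          rw [← this, hd2]
          exact (List.suffix_append _ _).sublist
        exact hrest.trans h2

theorem nodup_length_le (xs ys : List Char) (hx : xs.Nodup) (hsub : xs ⊆ ys) (hy : ys.Nodup) :
    xs.length ≤ ys.length := by
  have h1 : xs.toFinset ⊆ ys.toFinset := fun a ha =>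
    List.mem_toFinset.mpr (hsub (List.mem_toFinset.mp ha))
  calc xs.length = xs.toFinset.card := (List.toFinset_card_of_nodup hx).symm
    _ ≤ ys.toFinset.card := Finset.card_le_card h1
    _ = ys.length := List.toFinset_card_of_nodup hy

theorem nodup_length_lt (xs ys : List Char) (hx : xs.Nodup) (hsub : xs ⊆ ys) (hy : ys.Nodup)
    (v : Char) (hv : v ∈ ys) (hnv : v ∉ xs) : xs.length < ys.length := by
  have h1 : xs.toFinset ⊆ ys.toFinset := fun a ha =>
    List.mem_toFinset.mpr (hsub (List.mem_toFinset.mp ha))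
  have h2 : xs.toFinset ⊂ ys.toFinset :=
    ⟨h1, fun hc => hnv (List.mem_toFinset.mp (hc (List.mem_toFinset.mpr hv)))⟩
  calc xs.length = xs.toFinset.card := (List.toFinset_card_of_nodup hx).symm
    _ < ys.toFinset.card := Finset.card_lt_card h2
    _ = ys.length := List.toFinset_card_of_nodup hy

theorem solution_eq_alt (s t : String) : solution s t = solution_alt s t := by
  simp only [solution, solution_alt]
  set l := s.toList with hl
  set m := t.toList with hm
  rw [PySem.Dict.keys_counter l, PySem.Dict.keys_counter m, loop1_spec l m]
  set sa := PySem.List.sorted l (fun c => c) false with hsa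
  set sb := PySem.List.sorted m (fun c => c) false with hsb
  have hsaPerm : sa.Perm l := PySem.List.sorted_perm l _ false
  have hsbPerm : sb.Perm m := PySem.List.sorted_perm m _ false
  have hpermAB : sa = sb ↔ l.Perm m := PySem.List.sorted_id_eq_sorted_id_iff_perm l m
  have hpair_sa : sa.Pairwise (· ≤ ·) := PySem.List.sorted_pairwise l (fun c => c)
  have hpair_sb : sb.Pairwise (· ≤ ·) := PySem.List.sorted_pairwise m (fun c => c)
  have hmerge : mergeScan sa sb = true ↔ m.Subperm l := by
    rw [mergeScan_true_iff sa sb hpair_sa hpair_sb, hsbPerm.subperm_right, hsaPerm.subperm_left]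
  by_cases hsub : ∀ v ∈ PySem.Set.ofList m, m.count v ≤ l.count v
  · -- multiset inclusion holds: no 'return 0' on either side
    have hSUB : ∀ v, m.count v ≤ l.count v := by
      intro v
      by_cases hv : v ∈ m
      · exact hsub v ((PySem.Set.mem_ofList m v).mpr hv)
      · rw [List.count_eq_zero_of_not_mem hv]
        exact Nat.zero_le _
    have hmsub : m.Subperm l := List.subperm_iff_count.mpr hSUB
    have hkeysub : PySem.Set.ofList m ⊆ PySem.Set.ofList l := by
      intro v hv
      rw [PySem.Set.mem_ofList] at hv ⊢
      have h1 : 0 < m.count v := List.count_pos_iff.mpr hv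
      have h2 := hSUB v
      exact List.count_pos_iff.mp (by omega)
    have hlen_le : (PySem.Set.ofList m).length ≤ (PySem.Set.ofList l).length :=
      nodup_length_le _ _ (PySem.Set.nodup_ofList m) hkeysub (PySem.Set.nodup_ofList l)
    have hms : mergeScan sa sb = true := hmerge.mpr hmsub
    rw [if_neg (not_lt.mpr hlen_le), if_pos hsub, if_neg (show ¬ (mergeScan sa sb = false) by simp [hms])]
    have harray : solLoop2 l m (-1) = decide (scanSub l m ≠ []) := by
      have h0 := loop2_spec l m 0 (Nat.zero_le _)
      simp only [Nat.cast_zero, zero_sub, List.drop_zero] at h0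
      apply Bool.coe_iff_coe.mp
      simp only [decide_eq_true_eq, ne_eq, scanSub_eq_nil_iff]
      rw [← h0]
      cases solLoop2 l m (-1) <;> simp
    have hauto : ((PySem.Set.ofList m).any (fun v => decide (l.count v > m.count v))
        || decide ((PySem.Set.ofList l).length > (PySem.Set.ofList m).length))
        = decide (sa ≠ sb) := by
      apply Bool.coe_iff_coe.mp
      simp only [Bool.or_eq_true, List.any_eq_true, decide_eq_true_eq, ne_eq, hpermAB]
      constructor
      · rintro (⟨v, hv, hgt⟩ | hgt)
        · intro hp
          have := (List.perm_iff_count.mp hp) v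
          omega
        · intro hp
          have h1 : PySem.Set.ofList l ⊆ PySem.Set.ofList m := by
            intro v hv
            rw [PySem.Set.mem_ofList] at hv ⊢
            have hc := (List.perm_iff_count.mp hp) v
            have h2 : 0 < l.count v := List.count_pos_iff.mpr hv
            exact List.count_pos_iff.mp (by omega)
          have := nodup_length_le _ _ (PySem.Set.nodup_ofList l) h1 (PySem.Set.nodup_ofList m)
          omega
      · intro hp
        have hex : ∃ v, m.count v ≠ l.count v := by
          by_contra hc
          exact hp (List.perm_iff_count.mpr fun a => by
            by_contra hne
            exact hc ⟨a, fun he => hne he.symm⟩)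
        obtain ⟨v, hne⟩ := hex
        have hgt : m.count v < l.count v := lt_of_le_of_ne (hSUB v) hne
        by_cases hvm : v ∈ m
        · exact Or.inl ⟨v, (PySem.Set.mem_ofList m v).mpr hvm, hgt⟩
        · refine Or.inr ?_
          have hvl : v ∈ l := by
            have := List.count_eq_zero_of_not_mem hvm
            exact List.count_pos_iff.mp (by omega)
          exact nodup_length_lt _ _ (PySem.Set.nodup_ofList m) hkeysub (PySem.Set.nodup_ofList l)
            v ((PySem.Set.mem_ofList l v).mpr hvl) (fun hc => hvm ((PySem.Set.mem_ofList m v).mp hc))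
    simp only [Bool.false_or]
    rw [hauto, harray]
  · -- some character of t is missing or deficient in s: both return 0
    rw [if_neg hsub]
    have hmfalse : mergeScan sa sb = false := by
      rw [Bool.eq_false_iff]
      intro hc
      have hcount := List.subperm_iff_count.mp (hmerge.mp hc)
      exact hsub fun v _ => hcount v
    rw [if_pos hmfalse]
    by_cases hlen : (PySem.Set.ofList l).length < (PySem.Set.ofList m).length
    · rw [if_pos hlen]
    · rw [if_neg hlen]

-- ===== VERDICT (by name: the statement is the Claim_ definition above) =====
theorem solution_spec : Claim_equal_solution := by
  intro s t _
  unfold Spec_solution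
  exact solution_eq_alt s t
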